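-- pv_equiv track=rewrite | github.com/devGo20/algorithm | programmers/stock.py | solution
-- ===== SOURCE A (Python) =====
-- def solution(prices):
--     answer = []
--
--     for i in range(len(prices)):
--         sec = 0
--         for j in range(i, len(prices)-1):
--             if prices[i] <= prices[j]:
--                 sec += 1
--             else:
--                 break
--         answer.append(sec)
--
--     return answer
-- ===== SOURCE B (Python) =====
-- def solution(prices):
--     # Right-to-left pass with a monotonic stack of next-strictly-smaller
--     # candidates: answer[i] is the distance to the next smaller price on the
--     # right, or the distance to the last element if the price never drops.
--     answer = []
--     stack = []  # (price, index_from_right), strictly increasing in price top-down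
--     m = 0       # number of elements already processed (suffix length to the right)
--     for x in reversed(prices):
--         while stack and stack[-1][0] >= x:
--             stack.pop()
--         answer.append(m - stack[-1][1] if stack else m)
--         stack.append((x, m))
--         m += 1
--     answer.reverse()
--     return answer
-- ===== Notes on version B (the rewrite author's own statement) =====
-- stated objective: faster
-- what changed: Replaced A's nested forward scan (for each index, re-scan rightwards until a strictly smaller price) by a single right-to-left pass with a monotonic stack of next-smaller candidates.
import Mathlib
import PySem

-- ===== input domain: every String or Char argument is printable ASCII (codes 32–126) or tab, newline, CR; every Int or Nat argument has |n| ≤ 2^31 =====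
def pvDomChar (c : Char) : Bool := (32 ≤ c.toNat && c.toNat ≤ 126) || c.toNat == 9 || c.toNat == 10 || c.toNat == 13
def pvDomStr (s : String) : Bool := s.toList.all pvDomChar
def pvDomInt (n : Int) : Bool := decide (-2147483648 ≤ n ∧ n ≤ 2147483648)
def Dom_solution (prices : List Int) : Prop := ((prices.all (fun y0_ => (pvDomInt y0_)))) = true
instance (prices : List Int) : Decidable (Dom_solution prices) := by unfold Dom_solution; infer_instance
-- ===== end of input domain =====

-- B replaces A's quadratic nested forward scan by a single right-to-left pass
-- with a monotonic stack (objective: faster, O(n) instead of O(n^2)).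

-- ===== PORT A =====
-- inner loop 'for j in range(i, len(prices)-1): … break' of A; indices are always in range
def innerA (prices : List Int) (i : Int) : List Int → Int → Int
  | [], sec => sec
  | j :: js, sec =>
    if PySem.List.pyGetD prices i 0 ≤ PySem.List.pyGetD prices j 0 then
      innerA prices i js (sec + 1)
    else sec

def solution (prices : List Int) : List Int :=
  (PySem.List.pyRange 0 (prices.length : Int) 1).foldl
    (fun answer i =>
      answer ++ [innerA prices i (PySem.List.pyRange i ((prices.length : Int) - 1) 1) 0])
    []

-- ===== PORT B =====
-- 'while stack and stack[-1][0] >= x: stack.pop()'  (stack held top-first)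
def popB (x : Int) : List (Int × Int) → List (Int × Int)
  | [] => []
  | (v, r) :: st => if x ≤ v then popB x st else (v, r) :: st

-- one iteration of B's loop over reversed(prices); state = (answer, stack, m)
def stepB (s : List Int × List (Int × Int) × Int) (x : Int) : List Int × List (Int × Int) × Int :=
  let stack := popB x s.2.1
  let m := s.2.2
  let a : Int := match stack with
    | [] => m
    | (_, r) :: _ => m - r
  (s.1 ++ [a], (x, m) :: stack, m + 1)

def solution_alt (prices : List Int) : List Int :=
  (prices.reverse.foldl stepB ([], [], 0)).1.reverse

-- ===== PRECONDITION & SPEC =====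
def Spec_solution (prices : List Int) (out : List Int) : Prop := out = solution_alt prices
instance (prices : List Int) (out : List Int) : Decidable (Spec_solution prices out) := by unfold Spec_solution; infer_instance

-- ===== CLAIM (what is proved, stated in full; the proofs are below) =====
def Claim_equal_solution : Prop := ∀ (prices : List Int), Dom_solution prices → Spec_solution prices (solution prices)

-- ===== LEMMAS AND PROOFS =====

-- length of the run of elements ≥ x at the front of l
def twLen (x : Int) (l : List Int) : Nat := (l.takeWhile (fun y => decide (x ≤ y))).length

-- the stack B holds after processing the suffix l (top-first)
def chainS : List Int → List (Int × Int)
  | [] => []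
  | x :: rest => (x, (rest.length : Int)) :: popB x (chainS rest)

-- the common value of both programs
def outSpec : List Int → List Int
  | [] => []
  | x :: rest => min ((twLen x rest : Int) + 1) ((rest.length : Int)) :: outSpec rest

-- the Nat-valued per-index value A computes
def valN (p : List Int) (a : Nat) : Nat :=
  min (twLen (p.getD a 0) (p.drop (a + 1)) + 1) (p.length - 1 - a)

theorem popB_popB (x y : Int) (h : x ≤ y) : ∀ L, popB x (popB y L) = popB x L := by
  intro L
  induction L with
  | nil => rfl
  | cons e L ih =>
    obtain ⟨v, r⟩ := e
    by_cases hv : y ≤ v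
    · have hx : x ≤ v := le_trans h hv
      simp [popB, hv, hx, ih]
    · simp [popB, hv]

theorem twLen_cons_le (x y : Int) (rest : List Int) (h : x ≤ y) :
    twLen x (y :: rest) = twLen x rest + 1 := by
  simp [twLen, h]

theorem twLen_cons_gt (x y : Int) (rest : List Int) (h : ¬ x ≤ y) :
    twLen x (y :: rest) = 0 := by
  simp [twLen, h]

theorem twLen_le_length (x : Int) (l : List Int) : twLen x l ≤ l.length :=
  (List.takeWhile_sublist _).length_le

theorem twLen_take (x : Int) (l : List Int) (m : Nat) :
    twLen x (l.take m) = min (twLen x l) m := by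
  induction l generalizing m with
  | nil => simp [twLen]
  | cons y rest ih =>
    cases m with
    | zero => simp [twLen]
    | succ m =>
      by_cases h : x ≤ y
      · rw [List.take_succ_cons, twLen_cons_le _ _ _ h, twLen_cons_le _ _ _ h, ih]
        omega
      · rw [List.take_succ_cons, twLen_cons_gt _ _ _ h, twLen_cons_gt _ _ _ h]
        simp

-- characterisation of the popped stack
theorem chain_drop (x : Int) : ∀ l : List Int,
    (popB x (chainS l) = [] → twLen x l = l.length) ∧
    (∀ v r t, popB x (chainS l) = (v, r) :: t →
      v < x ∧ 0 ≤ r ∧ r = (l.length : Int) - 1 - (twLen x l : Int)) := by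
  intro l
  induction l with
  | nil => exact ⟨fun _ => rfl, by intro v r t h; simp [chainS, popB] at h⟩
  | cons y rest ih =>
    by_cases h : x ≤ y
    · have hpp : popB x (chainS (y :: rest)) = popB x (chainS rest) := by
        simp [chainS, popB, h, popB_popB x y h]
      constructor
      · intro he
        rw [hpp] at he
        have := ih.1 he
        simp [twLen_cons_le _ _ _ h, this]
      · intro v r t ht
        rw [hpp] at ht
        obtain ⟨h1, h0, h2⟩ := ih.2 v r t ht
        refine ⟨h1, h0, ?_⟩
        rw [twLen_cons_le _ _ _ h, List.length_cons]
        push_cast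
        omega
    · have hpp : popB x (chainS (y :: rest)) = (y, (rest.length : Int)) :: popB y (chainS rest) := by
        simp [chainS, popB, h]
      constructor
      · intro he; rw [hpp] at he; simp at he
      · intro v r t ht
        rw [hpp] at ht
        simp only [List.cons.injEq, Prod.mk.injEq] at ht
        obtain ⟨⟨rfl, rfl⟩, -⟩ := ht
        refine ⟨by omega, by positivity, ?_⟩
        rw [twLen_cons_gt _ _ _ h, List.length_cons]
        push_cast
        ring

-- the main-loop invariant of B
theorem runB (l : List Int) :
    l.reverse.foldl stepB ([], [], 0) = ((outSpec l).reverse, chainS l, (l.length : Int)) := by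
  induction l with
  | nil => rfl
  | cons x rest ih =>
    have hstep : (x :: rest).reverse.foldl stepB ([], [], 0)
        = stepB (rest.reverse.foldl stepB ([], [], 0)) x := by
      simp [List.foldl_append]
    rw [hstep, ih]
    unfold stepB
    have hval : (match popB x (chainS rest) with
          | [] => ((rest.length : Int))
          | (_, r) :: _ => (rest.length : Int) - r)
        = min ((twLen x rest : Int) + 1) ((rest.length : Int)) := by
      cases hs : popB x (chainS rest) with
      | nil =>
        have := (chain_drop x rest).1 hs
        simp [this]
      | cons e t =>
        obtain ⟨v, r⟩ := e
        obtain ⟨-, h0, h2⟩ := (chain_drop x rest).2 v r t hs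
        dsimp only
        subst h2
        have hle := twLen_le_length x rest
        have hr : (rest.length : Int) - ((rest.length : Int) - 1 - (twLen x rest : Int))
            = (twLen x rest : Int) + 1 := by ring
        rw [hr, min_def]
        split_ifs <;> omega
    refine congrArg₂ _ ?_ (by simp [chainS])
    simp only [hval]
    simp [outSpec]

theorem solution_alt_eq (l : List Int) : solution_alt l = outSpec l := by
  unfold solution_alt
  rw [runB]
  simp

-- A's inner loop counts the initial run of indices whose price stays ≥ prices[i]
theorem innerA_spec (p : List Int) (i : Int) : ∀ (js : List Int) (sec : Int),
    innerA p i js sec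
      = sec + ((js.takeWhile
          (fun j => decide (PySem.List.pyGetD p i 0 ≤ PySem.List.pyGetD p j 0))).length : Int) := by
  intro js
  induction js with
  | nil => intro sec; simp [innerA]
  | cons j js ih =>
    intro sec
    by_cases h : PySem.List.pyGetD p i 0 ≤ PySem.List.pyGetD p j 0
    · simp [innerA, h, ih]; ring
    · simp [innerA, h]

-- the takeWhile over the index range equals twLen over the corresponding segment
theorem range_tw (p : List Int) (x : Int) :
    ∀ (k a b : Nat), b - a = k → a ≤ b → b ≤ p.length →
    ((PySem.List.pyRange (a : Int) (b : Int) 1).takeWhile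
        (fun j => decide (x ≤ PySem.List.pyGetD p j 0))).length
      = twLen x ((p.take b).drop a) := by
  intro k
  induction k with
  | zero =>
    intro a b hk hab hb
    have : a = b := by omega
    subst this
    rw [PySem.List.pyRange_one_eq_nil (by omega)]
    simp [twLen]
  | succ k ih =>
    intro a b hk hab hb
    have hab' : a < b := by omega
    have ha : a < p.length := by omega
    rw [PySem.List.pyRange_one_cons (by exact_mod_cast hab')]
    have hget : PySem.List.pyGetD p (a : Int) 0 = p[a] := by
      simp [PySem.List.pyGetD_natCast, List.getD_eq_getElem?_getD, ha]
    have hdrop : p.drop a = p[a] :: p.drop (a + 1) := (List.getElem_cons_drop ha).symm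
    have hseg : (p.take b).drop a = p[a] :: (p.take b).drop (a + 1) := by
      have hba : b - a = (b - (a + 1)) + 1 := by omega
      rw [List.drop_take, List.drop_take, hba, hdrop, List.take_succ_cons]
    rw [hseg]
    by_cases h : x ≤ p[a]
    · rw [List.takeWhile_cons]
      simp only [hget, h, decide_true, if_true]
      rw [twLen_cons_le _ _ _ h, List.length_cons]
      have hc : ((a : Int) + 1) = ((a + 1 : Nat) : Int) := by push_cast; ring
      rw [hc, ih (a + 1) b (by omega) (by omega) hb]
    · rw [List.takeWhile_cons]
      simp only [hget, h, decide_false]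
      rw [twLen_cons_gt _ _ _ h]
      rfl

-- A's per-index value
theorem innerA_val (p : List Int) (a : Nat) (ha : a < p.length) :
    innerA p (a : Int) (PySem.List.pyRange (a : Int) ((p.length : Int) - 1) 1) 0
      = (valN p a : Int) := by
  have hget : p.getD a 0 = p[a] := by
    simp [List.getD_eq_getElem?_getD, ha]
  by_cases hlast : a + 1 = p.length
  · rw [PySem.List.pyRange_one_eq_nil (by omega)]
    unfold innerA valN
    have : p.length - 1 - a = 0 := by omega
    simp [this]
  · have hb : a ≤ p.length - 1 := by omega
    have hcast : ((p.length : Int) - 1) = ((p.length - 1 : Nat) : Int) := by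
      have : 1 ≤ p.length := by omega
      push_cast [this]
      ring
    rw [innerA_spec, hcast,
      range_tw p (PySem.List.pyGetD p (a : Int) 0) ((p.length - 1) - a) a (p.length - 1) rfl hb (by omega)]
    have hget' : PySem.List.pyGetD p (a : Int) 0 = p[a] := by
      simp [PySem.List.pyGetD_natCast, List.getD_eq_getElem?_getD, ha]
    have hdrop : p.drop a = p[a] :: p.drop (a + 1) := (List.getElem_cons_drop ha).symm
    rw [hget', List.drop_take, hdrop]
    have hba : p.length - 1 - a = (p.length - 1 - (a + 1)) + 1 := by omega
    rw [hba, List.take_succ_cons, twLen_cons_le _ _ _ le_rfl, twLen_take]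
    unfold valN
    rw [hget]
    have hlen : (p.drop (a + 1)).length = p.length - (a + 1) := by simp
    push_cast [Nat.cast_min]
    omega

-- outSpec as a map over indices
theorem outSpec_eq_map : ∀ p : List Int,
    outSpec p = (List.range p.length).map (fun a => ((valN p a : Nat) : Int)) := by
  intro p
  induction p with
  | nil => rfl
  | cons x rest ih =>
    rw [List.length_cons, List.range_succ_eq_map, List.map_cons, List.map_map]
    have h0 : ((valN (x :: rest) 0 : Nat) : Int)
        = min ((twLen x rest : Int) + 1) ((rest.length : Int)) := by
      unfold valN
      have hl : (x :: rest).length - 1 - 0 = rest.length := by simp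
      rw [hl]
      simp only [List.getD_cons_zero, List.drop_succ_cons, List.drop_zero]
      push_cast [Nat.cast_min]
      rfl
    have hsh : ∀ a : Nat, ((valN (x :: rest) (a + 1) : Nat) : Int) = ((valN rest a : Nat) : Int) := by
      intro a
      unfold valN
      simp
      have hl : rest.length - (a + 1) = rest.length - 1 - a := by omega
      rw [hl]
    unfold outSpec
    rw [h0, ih]
    congr 1
    apply List.map_congr_left
    intro a _
    exact (hsh a).symm

theorem solution_eq (p : List Int) : solution p = outSpec p := by
  unfold solution
  rw [PySem.List.pyRange_zero_natCast, PySem.List.foldl_append_singleton_eq_map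
    (f := fun i => innerA p i (PySem.List.pyRange i ((p.length : Int) - 1) 1) 0), List.map_map]
  rw [outSpec_eq_map]
  apply List.map_congr_left
  intro a hmem
  have ha : a < p.length := List.mem_range.mp hmem
  exact innerA_val p a ha

-- ===== VERDICT (by name: the statement is the Claim_ definition above) =====
theorem solution_spec : Claim_equal_solution := by
  intro prices _
  unfold Spec_solution
  rw [solution_eq, solution_alt_eq]
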